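-- pv_equiv track=rewrite | github.com/scacina/ProRepo | AdventofCode-2024/Day12.py | merge_vertical_lines
-- ===== SOURCE A (Python) =====
-- def merge_vertical_lines(lines):
--     # Group by x-coordinate
--     x_groups = {}
--     for line in lines:
--         x = line[0]
--         if x not in x_groups:
--             x_groups[x] = []
--         x_groups[x].append((line[1], line[3]))  # ystart and yend
--
--     # Merge y-intervals for each x group
--     merged_lines = []
--     for x, intervals in x_groups.items():
--         merged = merge_intervals(intervals)
--         for m in merged:
--             merged_lines.append((x, m[0], x, m[1]))
--     return merged_lines
--
-- def merge_intervals(intervals):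
--     # Sort intervals by start point
--     intervals.sort(key=lambda x: x[0])
--     merged = [intervals[0]]
--     for interval in intervals[1:]:
--         if interval[0] <= merged[-1][1]:
--             # Overlapping or contiguous
--             merged[-1] = (merged[-1][0], max(merged[-1][1], interval[1]))
--         else:
--             merged.append(interval)
--     return merged
-- ===== SOURCE B (Python) =====
-- def merge_vertical_lines(lines):
--     groups = {}
--     for x, ystart, _, yend in lines:
--         groups.setdefault(x, []).append((ystart, yend))
--     out = []
--     for x, ivs in groups.items():
--         stack = []
--         for s, e in reversed(sorted(ivs, key=lambda t: t[0])):
--             while stack and stack[-1][0] <= e: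
--                 e = max(e, stack.pop()[1])
--             stack.append((s, e))
--         while stack:
--             s, e = stack.pop()
--             out.append((x, s, x, e))
--     return out
-- ===== Notes on version B (the rewrite author's own statement) =====
-- stated objective: alternative
-- what changed: B keeps the grouping-by-x dict but replaces A's forward sort-and-extend-last merge (mutating merged[-1]) with a backward stack merge: it walks the sorted intervals right-to-left, absorbing into each interval every stack-top interval whose start it covers, then pushes it; the output is emitted by popping the stack.
import Mathlib
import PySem

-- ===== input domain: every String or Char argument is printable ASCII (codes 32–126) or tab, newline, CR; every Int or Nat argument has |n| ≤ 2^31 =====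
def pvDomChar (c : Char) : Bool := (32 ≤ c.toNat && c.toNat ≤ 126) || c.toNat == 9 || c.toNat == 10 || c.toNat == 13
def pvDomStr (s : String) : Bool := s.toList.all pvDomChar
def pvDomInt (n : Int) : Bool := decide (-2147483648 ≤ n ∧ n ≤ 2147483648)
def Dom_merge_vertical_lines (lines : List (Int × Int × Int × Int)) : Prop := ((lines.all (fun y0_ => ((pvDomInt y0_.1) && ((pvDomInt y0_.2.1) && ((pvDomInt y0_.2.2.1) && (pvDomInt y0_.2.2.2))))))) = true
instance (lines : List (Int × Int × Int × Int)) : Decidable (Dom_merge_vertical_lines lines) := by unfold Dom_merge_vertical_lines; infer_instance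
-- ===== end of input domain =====

-- B replaces A's forward extend-the-last-merged-interval scan by a backward stack merge
-- (walk sorted intervals right-to-left, absorb covered stack tops, pop to emit); alternative
-- decomposition, same asymptotic cost. A mutates its argument's grouped lists via in-place
-- sort; the equivalence proved here is about the return value only.

-- ===== PORT A =====
-- loop body of A's merge loop; 'merged' is kept head-reversed (head = Python's merged[-1])
def pvMergeStep (merged : List (Int × Int)) (interval : Int × Int) : List (Int × Int) :=
  match merged with
  | last :: prev =>
    if interval.1 ≤ last.2 then (last.1, max last.2 interval.2) :: prev
    else interval :: last :: prev
  | [] => [interval]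

def pvMergeIntervals (intervals : List (Int × Int)) : List (Int × Int) :=
  match PySem.List.sorted intervals (fun t => t.1) false with
  | [] => []   -- Python raises IndexError here; never reached (groups are nonempty)
  | i0 :: rest => (rest.foldl pvMergeStep [i0]).reverse

def merge_vertical_lines (lines : List (Int × Int × Int × Int)) : List (Int × Int × Int × Int) :=
  let x_groups := lines.foldl (fun d line =>
      let x := line.1
      let d := if d.contains x then d else d.insert x ([] : List (Int × Int))
      d.insert x (d.getD x [] ++ [(line.2.1, line.2.2.2)])) PySem.Dict.empty
  x_groups.items.foldl (fun acc p =>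
      (pvMergeIntervals p.2).foldl (fun acc2 m => acc2 ++ [(p.1, m.1, p.1, m.2)]) acc) []

-- ===== PORT B =====
-- the 'while stack and stack[-1][0] <= e' loop; the list's head is the Python stack's top
def pvAbsorb (s e : Int) (stack : List (Int × Int)) : List (Int × Int) :=
  match stack with
  | top :: rest => if top.1 ≤ e then pvAbsorb s (max e top.2) rest else (s, e) :: top :: rest
  | [] => [(s, e)]

def merge_vertical_lines_alt (lines : List (Int × Int × Int × Int)) : List (Int × Int × Int × Int) :=
  let groups := lines.foldl (fun d line =>
      d.modify line.1 [] (fun l => l ++ [(line.2.1, line.2.2.2)])) PySem.Dict.empty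
  groups.items.foldl (fun out p =>
      let stack := ((PySem.List.sorted p.2 (fun t => t.1) false).reverse).foldl
          (fun st iv => pvAbsorb iv.1 iv.2 st) []
      stack.foldl (fun out2 iv => out2 ++ [(p.1, iv.1, p.1, iv.2)]) out) []

-- ===== PRECONDITION & SPEC =====
def Spec_merge_vertical_lines (lines : List (Int × Int × Int × Int)) (out : List (Int × Int × Int × Int)) : Prop := out = merge_vertical_lines_alt lines
instance (lines : List (Int × Int × Int × Int)) (out : List (Int × Int × Int × Int)) : Decidable (Spec_merge_vertical_lines lines out) := by unfold Spec_merge_vertical_lines; infer_instance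

-- ===== CLAIM (what is proved, stated in full; the proofs are below) =====
def Claim_equal_merge_vertical_lines : Prop := ∀ (lines : List (Int × Int × Int × Int)), Dom_merge_vertical_lines lines → Spec_merge_vertical_lines lines (merge_vertical_lines lines)

-- ===== LEMMAS AND PROOFS =====

-- left-recursive characterisation of A's merge loop
def pvMrec : List (Int × Int) → List (Int × Int)
  | [] => []
  | [i] => [i]
  | i :: j :: t =>
    if j.1 ≤ i.2 then pvMrec ((i.1, max i.2 j.2) :: t) else i :: pvMrec (j :: t)
termination_by l => l.length
decreasing_by all_goals simp

theorem pv_foldl_ext {α β : Type} (f g : α → β → α) (h : ∀ a b, f a b = g a b) :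
    ∀ (l : List β) (a : α), l.foldl f a = l.foldl g a := by
  intro l
  induction l with
  | nil => intro a; rfl
  | cons x t ih => intro a; simp only [List.foldl_cons, h]; exact ih _

theorem pvMergeStep_loop (rest : List (Int × Int)) :
    ∀ (last : Int × Int) (prev : List (Int × Int)),
    (rest.foldl pvMergeStep (last :: prev)).reverse = prev.reverse ++ pvMrec (last :: rest) := by
  induction rest with
  | nil => intro last prev; simp [pvMrec]
  | cons iv t ih =>
    intro last prev
    simp only [List.foldl_cons, pvMergeStep]
    by_cases h : iv.1 ≤ last.2
    · rw [if_pos h, ih]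
      have : pvMrec (last :: iv :: t) = pvMrec ((last.1, max last.2 iv.2) :: t) := by
        rw [pvMrec]; simp [h]
      rw [this]
    · rw [if_neg h, ih]
      have : pvMrec (last :: iv :: t) = last :: pvMrec (iv :: t) := by
        rw [pvMrec]; simp [h]
      rw [this]; simp

theorem pvAbsorb_head (m : List (Int × Int)) : ∀ (s e : Int),
    ∃ e' r, pvAbsorb s e m = (s, e') :: r := by
  induction m with
  | nil => intro s e; exact ⟨e, [], rfl⟩
  | cons top rest ih =>
    intro s e
    by_cases h : top.1 ≤ e
    · obtain ⟨e', r, hr⟩ := ih s (max e top.2)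
      exact ⟨e', r, by rw [pvAbsorb, if_pos h, hr]⟩
    · exact ⟨e, top :: rest, by rw [pvAbsorb, if_neg h]⟩

theorem pvAbsorb_absorb (m : List (Int × Int)) : ∀ (s1 e1 s2 e2 : Int), s2 ≤ e1 →
    pvAbsorb s1 e1 (pvAbsorb s2 e2 m) = pvAbsorb s1 (max e1 e2) m := by
  induction m with
  | nil =>
    intro s1 e1 s2 e2 h
    simp [pvAbsorb, h]
  | cons top rest ih =>
    intro s1 e1 s2 e2 h
    by_cases h2 : top.1 ≤ e2
    · rw [pvAbsorb, if_pos h2, ih _ _ _ _ h]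
      rw [pvAbsorb, if_pos (le_max_of_le_right h2 : top.1 ≤ max e1 e2)]
      rw [max_assoc]
    · rw [pvAbsorb, if_neg h2, pvAbsorb, if_pos h]

theorem pvMrec_eq_foldr (l : List (Int × Int))
    (hp : l.Pairwise (fun a b => a.1 ≤ b.1)) :
    pvMrec l = l.foldr (fun iv st => pvAbsorb iv.1 iv.2 st) [] := by
  induction l using pvMrec.induct with
  | case1 => simp [pvMrec]
  | case2 i => simp [pvMrec, pvAbsorb]
  | case3 i j t h ih =>
    rw [pvMrec, if_pos h]
    have hp' : ((i.1, max i.2 j.2) :: t).Pairwise (fun a b : Int × Int => a.1 ≤ b.1) := by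
      rw [List.pairwise_cons] at hp ⊢
      exact ⟨fun b hb => hp.1 b (List.mem_cons_of_mem _ hb),
        (List.pairwise_cons.mp hp.2).2⟩
    rw [ih hp']
    simp only [List.foldr_cons]
    rw [pvAbsorb_absorb _ _ _ _ _ h]
  | case4 i j t h ih =>
    rw [pvMrec, if_neg h]
    have hp' : (j :: t).Pairwise (fun a b : Int × Int => a.1 ≤ b.1) := hp.tail
    rw [ih hp']
    simp only [List.foldr_cons]
    obtain ⟨e', r, hr⟩ := pvAbsorb_head (t.foldr (fun iv st => pvAbsorb iv.1 iv.2 st) []) j.1 j.2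
    rw [hr, pvAbsorb, if_neg (by simpa using h)]

theorem pv_group_merge (ivs : List (Int × Int)) :
    pvMergeIntervals ivs =
      ((PySem.List.sorted ivs (fun t => t.1) false).reverse).foldl
        (fun st iv => pvAbsorb iv.1 iv.2 st) [] := by
  rw [List.foldl_reverse]
  have hp := PySem.List.sorted_pairwise ivs (fun t : Int × Int => t.1)
  rw [pvMergeIntervals]
  cases hs : PySem.List.sorted ivs (fun t : Int × Int => t.1) false with
  | nil => rfl
  | cons i0 rest =>
    show (List.foldl pvMergeStep [i0] rest).reverse = _
    rw [pvMergeStep_loop]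
    rw [hs] at hp
    simp only [List.reverse_nil, List.nil_append]
    rw [pvMrec_eq_foldr _ hp]

theorem pv_insert_insert (d : PySem.Dict Int (List (Int × Int))) (x : Int) (w : List (Int × Int))
    (h : d.contains x = false) : (d.insert x []).insert x w = d.insert x w := by
  cases d with
  | mk l =>
    have h' : (l.any fun p => p.1 == x) = false := by
      simpa [PySem.Dict.contains, PySem.Dict.items] using h
    have hall : ∀ p ∈ l, ¬ (p.1 = x) := by
      intro p hp
      have := List.any_eq_false.mp h' p hp
      simpa using this
    have hmapl : l.map (fun p => if p.1 = x then (x, w) else p) = l := by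
      conv_rhs => rw [← List.map_id l]
      exact List.map_congr_left (fun p hp => by simp [hall p hp])
    simp [PySem.Dict.insert, PySem.Dict.contains, h', hmapl]

theorem pv_groups_eq (lines : List (Int × Int × Int × Int)) :
    lines.foldl (fun d line =>
      let x := line.1
      let d := if d.contains x then d else d.insert x ([] : List (Int × Int))
      d.insert x (d.getD x [] ++ [(line.2.1, line.2.2.2)])) PySem.Dict.empty
    = lines.foldl (fun d line =>
      d.modify line.1 [] (fun l => l ++ [(line.2.1, line.2.2.2)])) PySem.Dict.empty := by
  apply pv_foldl_ext
  intro d line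
  by_cases h : d.contains line.1
  · simp [PySem.Dict.modify, h]
  · have hf : d.contains line.1 = false := by simpa using h
    simp only [h, Bool.false_eq_true, if_false]
    rw [PySem.Dict.getD_insert_self, pv_insert_insert d line.1 _ hf]
    simp [PySem.Dict.modify, PySem.Dict.getD_of_not_contains d ([] : List (Int × Int)) hf]

-- ===== VERDICT (by name: the statement is the Claim_ definition above) =====
theorem merge_vertical_lines_spec : Claim_equal_merge_vertical_lines := by
  intro lines _
  unfold Spec_merge_vertical_lines merge_vertical_lines merge_vertical_lines_alt
  rw [pv_groups_eq]
  apply pv_foldl_ext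
  intro acc p
  rw [pv_group_merge]
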